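-- pv_equiv track=rewrite | github.com/miliar/Code_Jam_Webscraper | solutions_python/Problem_181/1596.py | solve
-- ===== SOURCE A (Python) =====
-- def solve(data):
-- 	list_data = list(data)
-- 	ans = [list_data[0]]
-- 	for i in range(len(list_data)-1):
-- 		if list_data[i+1] >= ans[0]:
-- 			ans.insert(0, list_data[i+1])
-- 		else:
-- 			ans.append(list_data[i+1])
-- 	return ans
-- ===== SOURCE B (Python) =====
-- def solve(data):
--     chars = list(data)
--     # pass 1: prefix-maximum table; maxes[i] = max(chars[0..i])
--     maxes = []
--     m = chars[0]
--     for c in chars: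
--         m = max(m, c)
--         maxes.append(m)
--     # pass 2: records (>= prefix max before them) vs the rest
--     records = [chars[0]]
--     rest = []
--     for c, pm in zip(chars[1:], maxes):
--         if c >= pm:
--             records.append(c)
--         else:
--             rest.append(c)
--     return records[::-1] + rest
-- ===== Notes on version B (the rewrite author's own statement) =====
-- stated objective: faster
-- what changed: A builds the answer in one pass with in-place front insertions keyed to ans[0]; B first precomputes the prefix-maximum table, then classifies each later element against it into records vs rest, returning reversed records plus rest.
import Mathlib
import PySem

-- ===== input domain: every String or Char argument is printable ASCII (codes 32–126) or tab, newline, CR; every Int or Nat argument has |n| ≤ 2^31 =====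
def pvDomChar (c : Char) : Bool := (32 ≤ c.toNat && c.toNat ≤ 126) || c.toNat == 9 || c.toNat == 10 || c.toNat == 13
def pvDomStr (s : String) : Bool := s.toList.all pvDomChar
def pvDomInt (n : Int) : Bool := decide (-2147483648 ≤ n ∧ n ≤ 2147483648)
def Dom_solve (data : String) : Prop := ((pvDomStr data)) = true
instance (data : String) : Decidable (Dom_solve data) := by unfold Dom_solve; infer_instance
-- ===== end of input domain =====

-- B replaces A's single pass with O(n)-cost front insertions by a two-pass
-- precompute-prefix-maxima-then-classify structure (objective: alternative).
-- Python's `>=` on the one-character strings of list(data) is code-point order,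
-- ported exactly as Char ≤ (both ports map chars back to 1-char strings at the end).

-- ===== PORT A =====
-- ans is kept as a list of chars; `ans.insert(0,c)` = c :: ans, `ans.append(c)` = ans ++ [c];
-- ans is never empty in the loop, so `ans[0]` = headD (default never used).
def solve (data : String) : List String :=
  match data.toList with
  | [] => []   -- Python raises IndexError here (list_data[0]); excluded by Pre_solve
  | x :: xs =>
    (xs.foldl (fun ans c => if ans.headD c ≤ c then c :: ans else ans ++ [c]) [x]).map
      (fun c => String.ofList [c])

-- ===== PORT B =====
def solve_alt (data : String) : List String :=
  match data.toList with
  | [] => []   -- Source B raises IndexError here (chars[0]); excluded by Pre_solve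
  | x :: xs =>
    let chars := x :: xs
    -- pass 1: prefix-maximum table
    let maxes := (chars.foldl (fun (p : List Char × Char) c =>
        (p.1 ++ [max p.2 c], max p.2 c)) ([], x)).1
    -- pass 2: classify chars[1:] against maxes (zip truncates like Python's zip)
    let pr := ((xs.zip maxes).foldl (fun (p : List Char × List Char) cm =>
        if cm.2 ≤ cm.1 then (p.1 ++ [cm.1], p.2) else (p.1, p.2 ++ [cm.1])) ([x], []))
    (pr.1.reverse ++ pr.2).map (fun c => String.ofList [c])

-- ===== PRECONDITION & SPEC =====
-- Pre_solve excludes only the empty string, on which both A and B raise IndexError.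
def Pre_solve (data : String) : Prop := data ≠ ""
instance (data : String) : Decidable (Pre_solve data) := by unfold Pre_solve; infer_instance
def pvWitness_solve : String := "ba"

def Spec_solve (data : String) (out : List String) : Prop := out = solve_alt data
instance (data : String) (out : List String) : Decidable (Spec_solve data out) := by unfold Spec_solve; infer_instance

-- ===== CLAIM (what is proved, stated in full; the proofs are below) =====
def Claim_equal_solve : Prop := ∀ (data : String), Dom_solve data → Pre_solve data → Spec_solve data (solve data)

-- ===== LEMMAS AND PROOFS =====

-- common recursive spec: running max m, returns (records, rest) in forward order
def pvGo (m : Char) : List Char → List Char × List Char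
  | [] => ([], [])
  | c :: cs =>
    if m ≤ c then ((pvGo c cs).1.cons c, (pvGo c cs).2)
    else ((pvGo m cs).1, (pvGo m cs).2.cons c)

-- prefix maxima starting from running max m
def pvPmax (m : Char) : List Char → List Char
  | [] => []
  | c :: cs => max m c :: pvPmax (max m c) cs

-- final running max of the prefix-maximum pass
def pvPfin (m : Char) : List Char → Char
  | [] => m
  | c :: cs => pvPfin (max m c) cs

theorem pvA_loop (xs : List Char) : ∀ (m : Char) (rr S : List Char),
    xs.foldl (fun ans c => if ans.headD c ≤ c then c :: ans else ans ++ [c]) ((m :: rr) ++ S)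
      = (pvGo m xs).1.reverse ++ (m :: rr) ++ S ++ (pvGo m xs).2 := by
  induction xs with
  | nil => intro m rr S; simp [pvGo]
  | cons c cs ih =>
    intro m rr S
    by_cases h : m ≤ c
    · have := ih c (m :: rr ++ S) []
      simp [h, pvGo] at this ⊢
      simpa using this
    · have := ih m rr (S ++ [c])
      simp [h, pvGo] at this ⊢
      simpa using this

theorem pvMax_loop (ys : List Char) : ∀ (acc : List Char) (m : Char),
    ys.foldl (fun (p : List Char × Char) c => (p.1 ++ [max p.2 c], max p.2 c)) (acc, m)
      = (acc ++ pvPmax m ys, pvPfin m ys) := by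
  induction ys with
  | nil => intro acc m; simp [pvPmax, pvPfin]
  | cons c cs ih =>
    intro acc m
    simp only [List.foldl_cons, pvPmax, pvPfin]
    rw [ih]
    simp

theorem pvB_loop (xs : List Char) : ∀ (m : Char) (R S : List Char),
    (xs.zip (m :: pvPmax m xs)).foldl (fun (p : List Char × List Char) cm =>
        if cm.2 ≤ cm.1 then (p.1 ++ [cm.1], p.2) else (p.1, p.2 ++ [cm.1])) (R, S)
      = (R ++ (pvGo m xs).1, S ++ (pvGo m xs).2) := by
  induction xs with
  | nil => intro m R S; simp [pvGo]
  | cons c cs ih =>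
    intro m R S
    by_cases h : m ≤ c
    · have hmc : max m c = c := max_eq_right h
      simp only [pvPmax, List.zip_cons_cons, List.foldl_cons, hmc]
      rw [if_pos h, ih c]
      simp [pvGo, h]
    · have hmc : max m c = m := max_eq_left ((not_le.mp h).le)
      simp only [pvPmax, List.zip_cons_cons, List.foldl_cons, hmc]
      rw [if_neg h, ih m]
      simp [pvGo, h]

-- ===== VERDICT (by name: the statement is the Claim_ definition above) =====
theorem solve_spec : Claim_equal_solve := by
  intro data _ _
  unfold Spec_solve solve solve_alt
  cases hd : data.toList with
  | nil => rfl
  | cons x xs =>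
    simp only
    rw [pvMax_loop]
    have hpm : pvPmax x (x :: xs) = x :: pvPmax x xs := by simp [pvPmax]
    simp only [List.nil_append, hpm]
    rw [pvB_loop xs x [x] []]
    have := pvA_loop xs x [] []
    simp only [List.append_nil] at this
    rw [this]
    simp
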